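-- pv_equiv track=rewrite | github.com/bendesousa/Topics-in-OR-Project | Code and Data/ga.py | evaluate_alg2
-- ===== SOURCE A (Python) =====
-- def evaluate_alg2(individual, events):
--
--     # Count number of clashes (soft objective)
--     slot_map = {}
--
--     for idx, (t, d) in enumerate(individual):
--         i, m = events[idx]
--         slot_map.setdefault((t, d), []).append((i, m))
--
--     clashes = 0
--
--     for _, assigned_events in slot_map.items():
--         if len(assigned_events) > 1:
--             clashes += len(assigned_events) - 1
--
--     return clashes
-- ===== SOURCE B (Python) =====
-- def evaluate_alg2(individual, events):
--     # One pass: an event clashes iff its (t, d) slot has already been seen.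
--     seen = set()
--     clashes = 0
--     for idx, (t, d) in enumerate(individual):
--         i, m = events[idx]
--         if (t, d) in seen:
--             clashes += 1
--         else:
--             seen.add((t, d))
--     return clashes
-- ===== Notes on version B (the rewrite author's own statement) =====
-- stated objective: simpler
-- what changed: Replaces the two-pass build-a-dict-of-event-lists-then-scan-its-values structure with a single pass that keeps only a set of already-seen (t,d) slots and counts an event as a clash the moment its slot repeats; the second loop and the stored event lists disappear.
import Mathlib
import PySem

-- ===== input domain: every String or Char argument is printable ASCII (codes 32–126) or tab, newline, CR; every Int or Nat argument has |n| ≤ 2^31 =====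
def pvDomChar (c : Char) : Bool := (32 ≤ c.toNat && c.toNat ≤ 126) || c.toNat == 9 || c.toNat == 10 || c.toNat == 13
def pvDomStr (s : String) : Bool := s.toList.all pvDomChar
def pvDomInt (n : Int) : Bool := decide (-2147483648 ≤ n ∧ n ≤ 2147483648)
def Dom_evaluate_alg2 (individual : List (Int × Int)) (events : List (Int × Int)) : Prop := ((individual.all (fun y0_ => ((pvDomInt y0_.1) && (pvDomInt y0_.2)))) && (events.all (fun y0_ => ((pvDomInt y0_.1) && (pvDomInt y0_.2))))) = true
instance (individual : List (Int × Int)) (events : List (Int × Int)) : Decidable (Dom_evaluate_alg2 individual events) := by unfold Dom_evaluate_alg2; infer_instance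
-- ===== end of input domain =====

-- B replaces A's build-dict-of-event-lists-then-scan two-pass by a single pass over the
-- events keeping only a set of seen (t,d) slots and counting repeats (simpler, same O(n)).


-- ===== PORT A =====
-- slot_map.setdefault((t,d),[]).append((i,m))  ==  slot_map[(t,d)] = slot_map.get((t,d),[]) + [(i,m)]
-- events[idx] is totalized with pyGetD; Pre_ excludes the out-of-range (IndexError) inputs.
def evaluate_alg2 (individual : List (Int × Int)) (events : List (Int × Int)) : Int :=
  let slot_map : PySem.Dict (Int × Int) (List (Int × Int)) :=
    (PySem.List.enumerate individual 0).foldl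
      (fun d p => d.modify p.2 [] (fun l => l ++ [PySem.List.pyGetD events p.1 ((0 : Int), (0 : Int))]))
      PySem.Dict.empty
  slot_map.items.foldl
    (fun clashes kv =>
      if ((kv.2.length : Int)) > 1 then clashes + (kv.2.length : Int) - 1 else clashes)
    0

-- ===== PORT B =====
def evaluate_alg2_alt (individual : List (Int × Int)) (events : List (Int × Int)) : Int :=
  ((PySem.List.enumerate individual 0).foldl
    (fun st p =>
      let _im := PySem.List.pyGetD events p.1 ((0 : Int), (0 : Int))  -- i, m = events[idx]
      if PySem.Set.contains st.1 p.2 then (st.1, st.2 + 1)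
      else (PySem.Set.add st.1 p.2, st.2))
    (((PySem.Set.empty : PySem.Set (Int × Int)), (0 : Int)))).2

-- ===== PRECONDITION & SPEC =====
-- Pre_ excludes exactly the inputs where events[idx] raises IndexError in A (and in B).
def Pre_evaluate_alg2 (individual : List (Int × Int)) (events : List (Int × Int)) : Prop :=
  individual.length ≤ events.length
instance (individual : List (Int × Int)) (events : List (Int × Int)) : Decidable (Pre_evaluate_alg2 individual events) := by unfold Pre_evaluate_alg2; infer_instance
def pvWitness_evaluate_alg2 : (List (Int × Int)) × (List (Int × Int)) :=
  ([(1, 2), (1, 2), (3, 4)], [(10, 11), (12, 13), (14, 15)])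
def Spec_evaluate_alg2 (individual : List (Int × Int)) (events : List (Int × Int)) (out : Int) : Prop := out = evaluate_alg2_alt individual events
instance (individual : List (Int × Int)) (events : List (Int × Int)) (out : Int) : Decidable (Spec_evaluate_alg2 individual events out) := by unfold Spec_evaluate_alg2; infer_instance

-- ===== CLAIM (what is proved, stated in full; the proofs are below) =====
def Claim_equal_evaluate_alg2 : Prop := ∀ (individual : List (Int × Int)) (events : List (Int × Int)), Dom_evaluate_alg2 individual events → Pre_evaluate_alg2 individual events → Spec_evaluate_alg2 individual events (evaluate_alg2 individual events)

-- ===== LEMMAS AND PROOFS =====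

-- B's loop invariant

theorem B_state (events xs : List (Int × Int)) :
    (PySem.List.enumerate xs 0).foldl
      (fun st p =>
        let _im := PySem.List.pyGetD events p.1 ((0 : Int), (0 : Int))
        if PySem.Set.contains st.1 p.2 then (st.1, st.2 + 1)
        else (PySem.Set.add st.1 p.2, st.2))
      (((PySem.Set.empty : PySem.Set (Int × Int)), (0 : Int)))
    = (PySem.Set.ofList xs, (xs.length : Int) - ((PySem.Set.ofList xs).length : Int)) := by
  induction xs using List.reverseRecOn with
  | nil => rfl
  | append_singleton xs x ih =>
    rw [PySem.List.enumerate_append, List.foldl_append, ih]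
    simp only [PySem.List.enumerate, PySem.Set.ofList_append_singleton]
    by_cases h : x ∈ PySem.Set.ofList xs
    · rw [List.foldl_cons]
      simp only [(PySem.Set.contains_iff _ _).mpr h, if_true, PySem.Set.add_of_mem h,
        List.foldl_nil, List.length_append, List.length_singleton]
      refine Prod.ext rfl ?_
      push_cast
      ring
    · rw [List.foldl_cons]
      have hc : PySem.Set.contains (PySem.Set.ofList xs) x = false := by
        simp [h]
      simp only [hc, Bool.false_eq_true, if_false, PySem.Set.add_of_not_mem h,
        List.foldl_nil, List.length_append, List.length_singleton]
      refine Prod.ext rfl ?_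
      push_cast
      ring

-- bridge between the two BEq instances on Int × Int for List.count
theorem count_inst_bridge (k : Int × Int) (xs : List (Int × Int)) :
    @List.count _ instBEqProd k xs = @List.count _ instBEqOfDecidableEq k xs := by
  unfold List.count
  apply List.countP_congr
  intro x _
  simp

theorem sum_counts (xs : List (Int × Int)) :
    ((PySem.Set.ofList xs).map (fun k => (xs.count k : Int))).sum = (xs.length : Int) := by
  have hperm : (PySem.Set.ofList xs).Perm xs.dedup := by
    rw [List.perm_ext_iff_of_nodup (PySem.Set.nodup_ofList xs) xs.nodup_dedup]
    intro a; simp [PySem.Set.mem_ofList, List.mem_dedup]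
  rw [(hperm.map (fun k => (xs.count k : Int))).sum_eq]
  have h2 : (List.map (fun k => ((xs.count k : Nat) : Int)) xs.dedup)
      = List.map (fun n : Nat => (n : Int)) (List.map (fun k => xs.count k) xs.dedup) := by
    simp [List.map_map, Function.comp]
  rw [h2, ← Nat.cast_list_sum]
  have h3 : (List.map (fun k => List.count k xs) xs.dedup).sum = xs.length := by
    have := List.sum_map_count_dedup_eq_length xs
    rw [← this]
    congr 1
    apply List.map_congr_left
    intro k _
    exact count_inst_bridge k xs
  rw [h3]

theorem evalA_closed (individual events : List (Int × Int)) :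
    evaluate_alg2 individual events
      = (individual.length : Int) - ((PySem.Set.ofList individual).length : Int) := by
  unfold evaluate_alg2
  have hfold :
      (PySem.List.enumerate individual 0).foldl
        (fun d p => d.modify p.2 [] (fun l => l ++ [PySem.List.pyGetD events p.1 ((0:Int),(0:Int))]))
        PySem.Dict.empty
      = ((PySem.List.enumerate individual 0).map
          (fun p => (p.2, PySem.List.pyGetD events p.1 ((0:Int),(0:Int))))).foldl
          (fun d q => d.modify q.1 [] (fun l => l ++ [q.2])) PySem.Dict.empty := by
    rw [List.foldl_map]
  set L := (PySem.List.enumerate individual 0).map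
      (fun p => (p.2, PySem.List.pyGetD events p.1 ((0:Int),(0:Int)))) with hL
  set D := L.foldl (fun d q => d.modify q.1 [] (fun l => l ++ [q.2])) PySem.Dict.empty with hD
  have hLfst : L.map (fun q => q.1) = individual := by
    rw [hL, List.map_map]
    exact PySem.List.map_snd_enumerate individual 0
  have hkeys : D.keys = PySem.Set.ofList individual := by
    rw [hD]
    rw [PySem.Dict.keys_foldl_modify_key L (fun q => q.1) [] (fun _ q => (fun l => l ++ [q.2])) PySem.Dict.empty]
    simp [hLfst, PySem.Set.update_nil_left]
  have hnd : D.keys.Nodup := by rw [hkeys]; exact PySem.Set.nodup_ofList individual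
  have hget : ∀ k, (D.getD k []).length = individual.count k := by
    intro k
    rw [hD, PySem.Dict.getD_foldl_modify_append]
    simp only [PySem.Dict.getD_empty, List.nil_append, List.length_map]
    rw [← List.countP_eq_length_filter]
    rw [← hLfst, List.count_eq_countP, List.countP_map]
    simp only [hL, List.countP_map]
    rfl
  rw [hfold]
  change List.foldl (fun (clashes : Int) (kv : (Int × Int) × List (Int × Int)) => if ((kv.2.length : Int)) > 1 then clashes + (kv.2.length : Int) - 1 else clashes) 0 D.items = (individual.length : Int) - ((PySem.Set.ofList individual).length : Int)
  rw [PySem.Dict.items_eq_map_keys D hnd [], List.foldl_map]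
  have hstep : ∀ (c : Int), ∀ k ∈ D.keys,
      (fun (c : Int) k => if (((D.getD k []).length : Int)) > 1 then c + ((D.getD k []).length : Int) - 1 else c) c k
      = (fun (c : Int) k => c + ((individual.count k : Int) - 1)) c k := by
    intro c k hk
    simp only [hget k]
    have hpos : 0 < individual.count k := by
      apply List.count_pos_iff.mpr
      rw [hkeys] at hk
      exact (PySem.Set.mem_ofList _ _).mp hk
    by_cases h1 : ((individual.count k : Int)) > 1
    · rw [if_pos h1]; ring
    · rw [if_neg h1]
      have : individual.count k = 1 := by omega
      rw [this]; push_cast; ring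
  rw [PySem.List.foldl_congr_mem D.keys _ _ 0 hstep]
  rw [PySem.List.foldl_add]
  rw [hkeys]
  have hsplit : (List.map (fun k => ((individual.count k : Int) - 1)) (PySem.Set.ofList individual))
      = List.map (fun k => ((individual.count k : Int) + (-1))) (PySem.Set.ofList individual) := by
    apply List.map_congr_left; intro k _; ring
  rw [hsplit, PySem.List.sum_map_add_int, sum_counts]
  rw [PySem.List.sum_map_const_int]
  ring

theorem evalB_closed (individual events : List (Int × Int)) :
    evaluate_alg2_alt individual events
      = (individual.length : Int) - ((PySem.Set.ofList individual).length : Int) := by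
  unfold evaluate_alg2_alt
  rw [B_state events individual]

-- ===== VERDICT (by name: the statement is the Claim_ definition above) =====
theorem evaluate_alg2_spec : Claim_equal_evaluate_alg2 := by
  intro individual events _ _
  unfold Spec_evaluate_alg2
  rw [evalA_closed, evalB_closed]
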